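-- pv_equiv track=rewrite | github.com/sasha-tsepilova/skyscraper | skyscrapers.py | check_horizontal_visibility
-- ===== SOURCE A (Python) =====
-- def left_to_right_check(input_line: str, pivot: int):
--     """
--     Check row-wise visibility from left to right.
--     Return True if number of building from the left-most hint is visible looking to the right,
--     False otherwise.
--
--     input_line - representing board row.
--     pivot - number on the left-most hint of the input_line.
--
--     >>> left_to_right_check("412453*", 4)
--     True
--     >>> left_to_right_check("452453*", 4)
--     False
--     """
--     without_hints = input_line[1:-1]
--     curent_visible = 0
--     all_visible = 0
--
--     for height in without_hints:
--         if int(height) > curent_visible: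
--             all_visible += 1
--             curent_visible = int(height)
--
--     return all_visible == pivot
--
-- def check_horizontal_visibility(board: list):
--     """
--     Check row-wise visibility (left-right and vice versa)
--
--     Return True if all horizontal hints are satisfiable,
--      i.e., for line 412453* , hint is 4, and 1245 are the four buildings
--       that could be observed from the hint looking to the right.
--
--     >>> check_horizontal_visibility(['***21**', '412453*', '423145*', '*543215', '*35214*'\
-- , '*41532*', '*2*1***'])
--     True
--     >>> check_horizontal_visibility(['***21**', '452453*', '423145*', '*543215', '*35214*'\
-- , '*41532*', '*2*1***'])
--     False
--     >>> check_horizontal_visibility(['***21**', '452413*', '423145*', '*543215', '*35214*'\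
-- , '*41532*', '*2*1***'])
--     False
--     """
--     for index, row in enumerate(board):
--         if index not in (0, len(board) - 1):
--
--             if row[0] != '*':
--                 pivot = int(row[0])
--                 if not left_to_right_check(row, pivot):
--                     return False
--
--             if row[-1] != '*':
--                 pivot = int(row[-1])
--                 if not left_to_right_check(row[::-1], pivot):
--                     return False
--     return True
-- ===== SOURCE B (Python) =====
-- def _visible(heights):
--     """Number of visible buildings = number of distinct positive prefix maxima."""
--     running = []
--     m = 0
--     for h in heights:
--         m = max(m, h)
--         running.append(m)
--     return len(set(running) - {0})
--
-- def check_horizontal_visibility(board: list):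
--     """Validate left/right row hints by counting distinct positive prefix maxima
--     of the interior heights (and of their reverse for the right hint)."""
--     for row in board[1:-1]:
--         if row[0] == '*' and row[-1] == '*':
--             continue
--         heights = [int(c) for c in row[1:-1]]
--         if row[0] != '*' and _visible(heights) != int(row[0]):
--             return False
--         if row[-1] != '*' and _visible(list(reversed(heights))) != int(row[-1]):
--             return False
--     return True
-- ===== Notes on version B (the rewrite author's own statement) =====
-- stated objective: alternative
-- what changed: B iterates over board[1:-1] directly instead of enumerate with an index test, and replaces A's scan-and-increment visibility counter by parsing the interior once, tabulating its running maxima and counting the distinct positive prefix maxima (len(set(running) - {0})), reusing the reversed table for the right hint.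
-- outside the precondition, e.g. on check_horizontal_visibility(['*', '2x', '*']): A returns False, B returns False; on check_horizontal_visibility(['*', '2*', 'x*', '*']): A returns False, B returns False
import Mathlib
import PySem

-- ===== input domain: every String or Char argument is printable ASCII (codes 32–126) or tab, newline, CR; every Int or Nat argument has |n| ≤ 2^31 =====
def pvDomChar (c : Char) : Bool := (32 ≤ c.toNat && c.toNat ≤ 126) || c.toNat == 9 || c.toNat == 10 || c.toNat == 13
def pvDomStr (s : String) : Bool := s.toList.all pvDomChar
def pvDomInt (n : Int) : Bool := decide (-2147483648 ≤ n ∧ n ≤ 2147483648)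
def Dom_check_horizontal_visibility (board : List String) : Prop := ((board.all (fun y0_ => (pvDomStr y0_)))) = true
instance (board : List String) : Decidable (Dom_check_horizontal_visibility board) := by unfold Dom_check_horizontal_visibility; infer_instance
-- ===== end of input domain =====

-- B re-counts visibility as the number of distinct positive prefix maxima of the interior
-- heights and iterates over board[1:-1] directly instead of enumerate + index test
-- (objective: alternative decomposition, same cost). Equivalence is about return values;
-- neither program mutates its argument.

-- ===== PORT A =====
-- Rows are handled as lists of characters (String.toList); int(c) on a one-character
-- string is PySem.Int.ofChars? [c]; a `none` anywhere = the Python raises (excluded by Pre_).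

-- the loop of left_to_right_check: carries (curent_visible, all_visible)
def pvLtrGo : List Char → Int → Int → Option Int
  | [], _, all_visible => some all_visible
  | height :: rest, curent_visible, all_visible =>
    match PySem.Int.ofChars? [height] with
    | none => none
    | some h => if h > curent_visible then pvLtrGo rest h (all_visible + 1)
                else pvLtrGo rest curent_visible all_visible

def left_to_right_check? (input_line : List Char) (pivot : Int) : Option Bool :=
  match pvLtrGo (PySem.List.slice input_line (some 1) (some (-1))) 0 0 with
  | none => none
  | some all_visible => some (decide (all_visible = pivot))

-- the body of A's loop for one interior row: some true = row passes (continue),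
-- some false = `return False`, none = the Python raises
def pvRowA (row : List Char) : Option Bool :=
  match PySem.List.pyGet? row 0 with            -- row[0]
  | none => none
  | some c0 =>
    -- the second `if` of the loop body (reached when the first one does not return)
    let step2 : Option Bool :=
      match PySem.List.pyGet? row (-1) with     -- row[-1]
      | none => none
      | some cl =>
        if cl ≠ '*' then
          match PySem.Int.ofChars? [cl] with    -- pivot = int(row[-1])
          | none => none
          | some pivot =>
            -- row[::-1] is row.reverse (PySem.List.slice?_none_none_neg_one)
            match left_to_right_check? row.reverse pivot with
            | none => none
            | some ok => if ok then some true else some false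
        else some true
    if c0 ≠ '*' then
      match PySem.Int.ofChars? [c0] with        -- pivot = int(row[0])
      | none => none
      | some pivot =>
        match left_to_right_check? row pivot with
        | none => none
        | some ok => if ok then step2 else some false
    else step2

-- `for index, row in enumerate(board)` with the `index not in (0, len(board)-1)` test
def pvGoA (n : Int) : Int → List (List Char) → Option Bool
  | _, [] => some true
  | index, row :: rest =>
    if index = 0 ∨ index = n - 1 then pvGoA n (index + 1) rest
    else
      match pvRowA row with
      | none => none
      | some false => some false
      | some true => pvGoA n (index + 1) rest

def check_horizontal_visibility (board : List String) : Bool :=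
  -- Pre_ guarantees the Python returns, i.e. the Option is some; `.getD false` only totalizes
  (pvGoA (PySem.List.len board) 0 (board.map String.toList)).getD false

-- ===== PORT B =====
-- _visible(heights): running-max table, then count distinct values except 0
def pvVisible (heights : List Int) : Int :=
  let st := heights.foldl (fun s h => (max s.1 h, s.2 ++ [max s.1 h])) (0, ([] : List Int))
  PySem.List.len (PySem.Set.diff (PySem.Set.ofList st.2) [0])   -- len(set(running) - {0})

-- the body of B's loop for one row of board[1:-1] (same some/none convention as pvRowA)
def pvRowB (row : List Char) : Option Bool :=
  match PySem.List.pyGet? row 0 with                 -- row[0]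
  | none => none
  | some c0 =>
    -- row[0] == '*' and row[-1] == '*'   (short-circuit)
    let skip? : Option Bool :=
      if c0 = '*' then
        match PySem.List.pyGet? row (-1) with
        | none => none
        | some cl => some (decide (cl = '*'))
      else some false
    match skip? with
    | none => none
    | some true => some true                         -- continue
    | some false =>
      -- heights = [int(c) for c in row[1:-1]]
      match (PySem.List.slice row (some 1) (some (-1))).mapM
              (fun c => PySem.Int.ofChars? [c]) with
      | none => none
      | some heights =>
        let leftFail? : Option Bool :=
          if c0 ≠ '*' then
            match PySem.Int.ofChars? [c0] with
            | none => none
            | some p => some (decide (pvVisible heights ≠ p))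
          else some false
        match leftFail? with
        | none => none
        | some true => some false                    -- return False
        | some false =>
          match PySem.List.pyGet? row (-1) with      -- row[-1]
          | none => none
          | some cl =>
            if cl ≠ '*' then
              match PySem.Int.ofChars? [cl] with
              | none => none
              | some p =>
                if pvVisible heights.reverse ≠ p then some false else some true
            else some true

def pvGoB : List (List Char) → Option Bool
  | [] => some true
  | row :: rest =>
    match pvRowB row with
    | none => none
    | some false => some false
    | some true => pvGoB rest

def check_horizontal_visibility_alt (board : List String) : Bool :=
  (pvGoB ((PySem.List.slice board (some 1) (some (-1))).map String.toList)).getD false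

-- ===== PRECONDITION & SPEC =====
-- a well-formed interior row: nonempty, each non-'*' end hint is a digit, and when a hint
-- is present the interior characters are all digits (so every int() the programs run succeeds)
def pvRowOK (r : List Char) : Bool :=
  match r.head?, r.getLast? with
  | some c0, some cl =>
    (c0 == '*' || (c0.isDigit && (r.tail.dropLast.all Char.isDigit))) &&
    (cl == '*' || (cl.isDigit && (r.tail.dropLast.all Char.isDigit)))
  | _, _ => false

-- Pre_ asks every interior row to be well-formed. This also excludes some boards on which A
-- still RETURNS False early, before reaching a malformed later row or the malformed right
-- end of the failing row; B returns False on those boards as well (see claim cites).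
def Pre_check_horizontal_visibility (board : List String) : Prop :=
  ∀ s ∈ (board.drop 1).dropLast, pvRowOK s.toList = true
instance (board : List String) : Decidable (Pre_check_horizontal_visibility board) := by
  unfold Pre_check_horizontal_visibility; infer_instance

def pvWitness_check_horizontal_visibility : List String :=
  ["***21**", "412453*", "423145*", "*543215", "*35214*", "*41532*", "*2*1***"]

def Spec_check_horizontal_visibility (board : List String) (out : Bool) : Prop := out = check_horizontal_visibility_alt board
instance (board : List String) (out : Bool) : Decidable (Spec_check_horizontal_visibility board out) := by unfold Spec_check_horizontal_visibility; infer_instance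

-- ===== CLAIM (what is proved, stated in full; the proofs are below) =====
def Claim_equal_check_horizontal_visibility : Prop := ∀ (board : List String), Dom_check_horizontal_visibility board → Pre_check_horizontal_visibility board → Spec_check_horizontal_visibility board (check_horizontal_visibility board)

-- ===== LEMMAS AND PROOFS =====

-- every digit character is one of the ten
theorem pvDigitCases (c : Char) (h : c.isDigit = true) :
    c = '0' ∨ c = '1' ∨ c = '2' ∨ c = '3' ∨ c = '4' ∨ c = '5' ∨ c = '6' ∨ c = '7' ∨ c = '8' ∨ c = '9' := by
  rw [Char.isDigit] at h
  simp only [Bool.and_eq_true, decide_eq_true_eq] at h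
  obtain ⟨h1, h2⟩ := h
  have hofn := Char.ofNat_toNat c
  have hb1 : 48 ≤ c.toNat := h1
  have hb2 : c.toNat ≤ 57 := h2
  set n := c.toNat with hn
  clear_value n
  interval_cases n <;> (subst hofn; decide)

def pvDigitVal (c : Char) : Int := (c.toNat : Int) - 48

theorem pvOfChars_digit (c : Char) (h : c.isDigit = true) :
    PySem.Int.ofChars? [c] = some (pvDigitVal c) := by
  rcases pvDigitCases c h with h|h|h|h|h|h|h|h|h|h <;> subst h <;> decide

-- A's visibility count, as a function of the parsed heights
def pvCount : List Int → Int → Int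
  | [], _ => 0
  | h :: t, cur => if h > cur then 1 + pvCount t h else pvCount t cur

-- the running-maximum sequence B tabulates
def pvRM : List Int → Int → List Int
  | [], _ => []
  | h :: t, m => max m h :: pvRM t (max m h)

theorem pvFoldl_rm (hs : List Int) : ∀ (m : Int) (acc : List Int),
    hs.foldl (fun s h => (max s.1 h, s.2 ++ [max s.1 h])) (m, acc)
      = (hs.foldl max m, acc ++ pvRM hs m) := by
  induction hs with
  | nil => intro m acc; simp [pvRM]
  | cons h t ih => intro m acc; simp [pvRM, ih (max m h) (acc ++ [max m h])]

theorem pvRM_ge (hs : List Int) : ∀ (m x : Int), x ∈ pvRM hs m → m ≤ x := by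
  induction hs with
  | nil => intro m x hx; simp [pvRM] at hx
  | cons h t ih =>
    intro m x hx
    rcases (by simpa [pvRM] using hx : x = max m h ∨ x ∈ pvRM t (max m h)) with rfl | hx
    · exact le_max_left _ _
    · exact le_trans (le_max_left _ _) (ih _ _ hx)

theorem pvCount_card (hs : List Int) : ∀ (m : Int),
    pvCount hs m = (((pvRM hs m).toFinset.erase m).card : Int) := by
  induction hs with
  | nil => intro m; simp [pvCount, pvRM]
  | cons h t ih =>
    intro m
    by_cases hlt : h > m
    · have hmax : max m h = h := max_eq_right (le_of_lt hlt)
      have hnot : m ∉ insert h (pvRM t h).toFinset := by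
        simp only [Finset.mem_insert, List.mem_toFinset]
        rintro (rfl | hm)
        · exact lt_irrefl _ hlt
        · exact absurd (pvRM_ge t h m hm) (not_le.mpr hlt)
      rw [show pvCount (h :: t) m = 1 + pvCount t h by simp [pvCount, hlt]]
      rw [ih h]
      simp only [pvRM, hmax, List.toFinset_cons, Finset.erase_eq_self.mpr hnot]
      by_cases hmem : h ∈ (pvRM t h).toFinset
      · have hpos : 0 < (pvRM t h).toFinset.card := Finset.card_pos.mpr ⟨h, hmem⟩
        rw [Finset.insert_eq_self.mpr hmem, Finset.card_erase_of_mem hmem]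
        push_cast [Nat.cast_sub (Nat.one_le_iff_ne_zero.mpr (Nat.pos_iff_ne_zero.mp hpos))]
        ring
      · rw [Finset.card_insert_of_notMem hmem, Finset.erase_eq_self.mpr hmem]
        push_cast; ring
    · have hmax : max m h = m := max_eq_left (not_lt.mp hlt)
      rw [show pvCount (h :: t) m = pvCount t m by simp [pvCount, hlt]]
      rw [ih m]
      simp [pvRM, hmax, Finset.erase_insert_eq_erase]

theorem pvLen_diff (l : List Int) (v : Int) :
    PySem.List.len (PySem.Set.diff (PySem.Set.ofList l) [v]) = ((l.toFinset.erase v).card : Int) := by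
  have hnd : (PySem.Set.diff (PySem.Set.ofList l) [v]).Nodup :=
    PySem.Set.nodup_diff (PySem.Set.ofList l) [v] (PySem.Set.nodup_ofList l)
  have hfin : (PySem.Set.diff (PySem.Set.ofList l) [v]).toFinset = l.toFinset.erase v := by
    ext x
    simp [PySem.Set.mem_diff, PySem.Set.mem_ofList, Finset.mem_erase, and_comm]
  rw [PySem.List.len_eq, ← List.toFinset_card_of_nodup hnd, hfin]

theorem pvVisible_eq_count (hs : List Int) : pvVisible hs = pvCount hs 0 := by
  rw [pvVisible]
  simp only [pvFoldl_rm hs 0 [], List.nil_append]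
  rw [pvLen_diff, pvCount_card]

theorem pvMapM_digits (l : List Char) (h : ∀ c ∈ l, c.isDigit = true) :
    l.mapM (fun c => PySem.Int.ofChars? [c]) = some (l.map pvDigitVal) := by
  induction l with
  | nil => rfl
  | cons c t ih =>
    rw [List.mapM_cons, pvOfChars_digit c (h c (by simp)), ih (fun c hc => h c (by simp [hc]))]
    rfl

theorem pvLtrGo_digits (chars : List Char) : ∀ (cur all : Int),
    (∀ c ∈ chars, c.isDigit = true) →
    pvLtrGo chars cur all = some (all + pvCount (chars.map pvDigitVal) cur) := by
  induction chars with
  | nil => intro cur all _; simp [pvLtrGo, pvCount]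
  | cons c t ih =>
    intro cur all h
    rw [pvLtrGo, pvOfChars_digit c (h c (by simp))]
    have ht : ∀ c ∈ t, c.isDigit = true := fun c hc => h c (by simp [hc])
    by_cases hgt : pvDigitVal c > cur
    · simp only [hgt, if_pos, List.map_cons, pvCount, ih (pvDigitVal c) (all + 1) ht]
      congr 1; ring
    · simp only [hgt, List.map_cons, pvCount, ih cur all ht, if_false]

-- xs[1:-1] as tail+dropLast
theorem pvSlice11 {α : Type} (xs : List α) :
    PySem.List.slice xs (some 1) (some (-1)) = xs.tail.dropLast := by
  cases xs with
  | nil => rfl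
  | cons a t =>
    have hnn : ¬((t.length : Int) < 0) := by omega
    simp [PySem.List.slice, PySem.List.clampIdx, hnn, List.dropLast_eq_take]

theorem pvRevInterior {α : Type} (xs : List α) :
    xs.reverse.tail.dropLast = xs.tail.dropLast.reverse := by
  rw [List.tail_reverse, List.dropLast_reverse, List.tail_dropLast]

-- the left/right check of A on a row with digit interior, as a pvCount comparison
theorem pvLtr_eq (r : List Char) (p : Int) (hd : ∀ c ∈ r.tail.dropLast, c.isDigit = true) :
    left_to_right_check? r p
      = some (decide (pvCount (r.tail.dropLast.map pvDigitVal) 0 = p)) := by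
  rw [left_to_right_check?, pvSlice11, pvLtrGo_digits _ 0 0 hd, zero_add]

-- the heart of the file: on a well-formed row, A's loop body and B's loop body agree
theorem pvRow_eq (r : List Char) (hok : pvRowOK r = true) : pvRowA r = pvRowB r := by
  rcases r with _ | ⟨a, t⟩
  · simp [pvRowOK] at hok
  have hnil : (a :: t) ≠ [] := by simp
  have hgl : (a :: t).getLast? = some ((a :: t).getLast hnil) := List.getLast?_eq_some_getLast hnil
  set lst := (a :: t).getLast hnil with hlstdef
  rw [pvRowOK] at hok
  simp only [List.head?_cons, hgl, Bool.and_eq_true, Bool.or_eq_true, beq_iff_eq,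
    List.all_eq_true, List.tail_cons] at hok
  obtain ⟨hL, hR⟩ := hok
  have h1 : PySem.List.pyGet? (a :: t) (-1) = some lst := by
    rw [PySem.List.pyGet?_neg_one, hgl]
  by_cases ha : a = '*'
  · subst ha
    by_cases hlstar : lst = '*'
    · simp [pvRowA, pvRowB, h1, hlstar]
    · obtain ⟨hldig, hIdig⟩ := hR.resolve_left hlstar
      have hts := pvMapM_digits _ hIdig
      have hrevdig : ∀ c ∈ ('*' :: t).reverse.tail.dropLast, c.isDigit = true := by
        rw [pvRevInterior]; intro c hc; exact hIdig c (by simpa using List.mem_reverse.mp hc)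
      have hltr := pvLtr_eq ('*' :: t).reverse (pvDigitVal lst) hrevdig
      rw [pvRevInterior] at hltr
      simp only [List.tail_cons, List.map_reverse, List.map_dropLast, List.reverse_cons] at hltr hts
      by_cases hv : pvCount ((t.map pvDigitVal).dropLast.reverse) 0 = pvDigitVal lst <;>
        simp [pvRowA, pvRowB, h1, hlstar, hts, hltr, hv,
          pvOfChars_digit lst hldig, pvSlice11, pvVisible_eq_count]
  · obtain ⟨hadig, hIdig⟩ := hL.resolve_left ha
    have hts := pvMapM_digits _ hIdig
    have hltrL := pvLtr_eq (a :: t) (pvDigitVal a) (by simpa using hIdig)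
    simp only [List.tail_cons, List.map_dropLast] at hltrL hts
    by_cases hleft : pvCount ((t.map pvDigitVal).dropLast) 0 = pvDigitVal a
    · -- left hint satisfied: both go on to the right check
      by_cases hlstar : lst = '*'
      · simp [pvRowA, pvRowB, h1, ha, hlstar, hts, hltrL, hleft,
          pvOfChars_digit a hadig, pvSlice11, pvVisible_eq_count]
      · obtain ⟨hldig, hIdig'⟩ := hR.resolve_left hlstar
        have hrevdig : ∀ c ∈ (a :: t).reverse.tail.dropLast, c.isDigit = true := by
          rw [pvRevInterior]; intro c hc; exact hIdig c (by simpa using List.mem_reverse.mp hc)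
        have hltr := pvLtr_eq (a :: t).reverse (pvDigitVal lst) hrevdig
        rw [pvRevInterior] at hltr
        simp only [List.tail_cons, List.map_reverse, List.map_dropLast, List.reverse_cons] at hltr
        by_cases hv : pvCount ((t.map pvDigitVal).dropLast.reverse) 0 = pvDigitVal lst <;>
          simp [pvRowA, pvRowB, h1, ha, hlstar, hts, hltr, hltrL, hleft, hv,
            pvOfChars_digit a hadig, pvOfChars_digit lst hldig, pvSlice11, pvVisible_eq_count]
    · -- left hint fails: both return False
      simp [pvRowA, pvRowB, ha, hts, hltrL, hleft,
        pvOfChars_digit a hadig, pvSlice11, pvVisible_eq_count]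

theorem pvGo_eq (mid : List (List Char)) (last : List Char) : ∀ (n i : Int),
    1 ≤ i → i + mid.length = n - 1 → (∀ r ∈ mid, pvRowOK r = true) →
    pvGoA n i (mid ++ [last]) = pvGoB mid := by
  induction mid with
  | nil =>
    intro n i h1 hlen _
    simp only [List.length_nil] at hlen
    simp [pvGoA, pvGoB, show i = n - 1 by omega]
  | cons r t ih =>
    intro n i h1 hlen hok
    have hi0 : ¬(i = 0 ∨ i = n - 1) := by
      simp only [List.length_cons] at hlen; push_cast at hlen; omega
    rw [List.cons_append, pvGoA, if_neg hi0, pvRow_eq r (hok r (by simp)), pvGoB]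
    cases hb : pvRowB r with
    | none => rfl
    | some b =>
      cases b
      · rfl
      · exact ih n (i + 1) (by omega) (by simp only [List.length_cons] at hlen; push_cast at hlen ⊢; omega)
          (fun x hx => hok x (by simp [hx]))

-- ===== VERDICT (by name: the statement is the Claim_ definition above) =====
theorem check_horizontal_visibility_spec : Claim_equal_check_horizontal_visibility := by
  intro board _ hpre
  unfold Spec_check_horizontal_visibility
  rcases board with _ | ⟨b0, rest⟩
  · rfl
  rcases rest.eq_nil_or_concat with rfl | ⟨mid, bl, hconcat⟩
  · rfl
  · rw [List.concat_eq_append] at hconcat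
    subst hconcat
    unfold check_horizontal_visibility check_horizontal_visibility_alt
    have hmid : (((b0 :: (mid ++ [bl])).drop 1).dropLast) = mid := by
      simp
    have hok : ∀ r ∈ mid.map String.toList, pvRowOK r = true := by
      intro r hr
      rcases List.mem_map.mp hr with ⟨s, hs, rfl⟩
      exact hpre s (by rw [hmid]; exact hs)
    have hslice : PySem.List.slice (b0 :: (mid ++ [bl])) (some 1) (some (-1)) = mid := by
      rw [pvSlice11]; simp
    rw [hslice]
    have h0 : pvGoA (PySem.List.len (b0 :: (mid ++ [bl]))) 0
        ((b0 :: (mid ++ [bl])).map String.toList)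
        = pvGoA (PySem.List.len (b0 :: (mid ++ [bl]))) 1 (mid.map String.toList ++ [bl.toList]) := by
      simp [pvGoA]
    rw [h0, pvGo_eq (mid.map String.toList) bl.toList _ 1 (by omega)
      (by simp [PySem.List.len_eq]; ring) hok]
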